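-- pv_equiv track=rewrite | github.com/chinmayee19feb/rfid-MQTT-gate-intelligence | ai_layer/anomaly_detector.py | _calculate_time_window
-- ===== SOURCE A (Python) =====
-- def _calculate_time_window(events: list[dict]) -> int:
--     """Calculate the time span in seconds covered by the events."""
--     timestamps = []
--     for event in events:
--         ts = event.get("TIMESTAMP") or event.get("EVENTTIME")
--         if ts:
--             try:
--                 timestamps.append(int(ts))
--             except (ValueError, TypeError):
--                 pass
--
--     if len(timestamps) < 2:
--         return 0
--     return (max(timestamps) - min(timestamps)) // 1000
-- ===== SOURCE B (Python) =====
-- def _calculate_time_window(events: list[dict]) -> int: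
--     """Calculate the time span in seconds covered by the events."""
--     count = 0
--     lo = 0
--     hi = 0
--     for event in events:
--         ts = event.get("TIMESTAMP") or event.get("EVENTTIME")
--         if ts:
--             try:
--                 v = int(ts)
--             except (ValueError, TypeError):
--                 continue
--             if count == 0:
--                 lo = v
--                 hi = v
--                 count = 1
--             else:
--                 lo = min(lo, v)
--                 hi = max(hi, v)
--                 count += 1
--     if count >= 2:
--         return (hi - lo) // 1000
--     return 0
-- ===== Notes on version B (the rewrite author's own statement) =====
-- stated objective: alternative
-- what changed: Replaces the collect-then-scan design (build a timestamps list, then call max and min over it) with a single streaming pass that maintains a running count, minimum and maximum and never materialises the list.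
import Mathlib
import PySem

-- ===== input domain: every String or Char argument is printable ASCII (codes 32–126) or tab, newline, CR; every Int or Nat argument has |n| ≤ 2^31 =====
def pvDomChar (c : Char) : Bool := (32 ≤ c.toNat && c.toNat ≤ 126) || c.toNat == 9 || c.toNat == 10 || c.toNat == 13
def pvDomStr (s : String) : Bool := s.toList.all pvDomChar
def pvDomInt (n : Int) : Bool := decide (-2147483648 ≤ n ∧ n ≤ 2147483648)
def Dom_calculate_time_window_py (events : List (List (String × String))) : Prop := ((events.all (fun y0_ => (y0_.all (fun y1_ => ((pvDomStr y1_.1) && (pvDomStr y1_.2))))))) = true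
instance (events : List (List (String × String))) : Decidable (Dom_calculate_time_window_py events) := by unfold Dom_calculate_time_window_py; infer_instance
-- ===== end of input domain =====

-- B replaces A's collect-then-scan (build the list of timestamps, then max/min over it)
-- with one streaming pass keeping a running count/min/max; return value unchanged.

-- shared helper: both Pythons contain the identical lines
--   ts = event.get("TIMESTAMP") or event.get("EVENTTIME"); if ts: try int(ts) except (ValueError, TypeError)
-- 'pvTs e = some v' iff that code yields the int v for this event (none = skipped).
def pvTs (event : List (String × String)) : Option Int :=
  let ts : Option String :=
    match PySem.Dict.get? (PySem.Dict.mk event) "TIMESTAMP" with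
    | some s => if s ≠ "" then some s else PySem.Dict.get? (PySem.Dict.mk event) "EVENTTIME"
    | none => PySem.Dict.get? (PySem.Dict.mk event) "EVENTTIME"
  match ts with
  | some s => if s ≠ "" then PySem.Int.ofStr? s else none
  | none => none

-- ===== PORT A =====
def calculate_time_window_py (events : List (List (String × String))) : Int :=
  let timestamps : List Int :=
    events.foldl (fun acc e => match pvTs e with | some v => acc ++ [v] | none => acc) []
  if timestamps.length < 2 then 0
  else
    match PySem.List.max? timestamps (fun x => x), PySem.List.min? timestamps (fun x => x) with
    | some mx, some mn => PySem.Int.floordiv (mx - mn) 1000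
    | _, _ => 0   -- unreachable: timestamps is nonempty here

-- ===== PORT B =====
def pvStep (st : Nat × Int × Int) (v : Int) : Nat × Int × Int :=
  match st with
  | (0, _, _) => (1, v, v)
  | (n+1, lo, hi) => (n+2, min lo v, max hi v)

def calculate_time_window_py_alt (events : List (List (String × String))) : Int :=
  let st := events.foldl (fun st e => match pvTs e with | some v => pvStep st v | none => st) (0, 0, 0)
  if 2 ≤ st.1 then PySem.Int.floordiv (st.2.2 - st.2.1) 1000 else 0

-- ===== PRECONDITION & SPEC =====
def Spec_calculate_time_window_py (events : List (List (String × String))) (out : Int) : Prop := out = calculate_time_window_py_alt events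
instance (events : List (List (String × String))) (out : Int) : Decidable (Spec_calculate_time_window_py events out) := by unfold Spec_calculate_time_window_py; infer_instance

-- ===== CLAIM (what is proved, stated in full; the proofs are below) =====
def Claim_equal_calculate_time_window_py : Prop := ∀ (events : List (List (String × String))), Dom_calculate_time_window_py events → Spec_calculate_time_window_py events (calculate_time_window_py events)

-- ===== LEMMAS AND PROOFS =====

-- A's accumulating loop builds exactly the filterMap of pvTs.
lemma foldA_eq_filterMap (events : List (List (String × String))) (acc : List Int) :
    events.foldl (fun acc e => match pvTs e with | some v => acc ++ [v] | none => acc) acc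
      = acc ++ events.filterMap pvTs := by
  induction events generalizing acc with
  | nil => simp
  | cons e t ih =>
    cases h : pvTs e <;> simp [List.foldl_cons, h, ih]

-- B's loop over events is the pvStep loop over the filtered timestamps.
lemma foldB_eq_foldStep (events : List (List (String × String))) (st : Nat × Int × Int) :
    events.foldl (fun st e => match pvTs e with | some v => pvStep st v | none => st) st
      = (events.filterMap pvTs).foldl pvStep st := by
  induction events generalizing st with
  | nil => simp
  | cons e t ih =>
    cases h : pvTs e <;> simp [List.foldl_cons, h, ih]

-- the streaming state in the running branch: count, running min, running max
lemma foldStep_pos (t : List Int) (n : Nat) (lo hi : Int) :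
    t.foldl pvStep (n+1, lo, hi) = (n+1+t.length, t.foldl min lo, t.foldl max hi) := by
  induction t generalizing n lo hi with
  | nil => simp
  | cons x r ih => simp [List.foldl_cons, pvStep, ih]; omega

lemma foldStep_cons (x : Int) (t : List Int) :
    (x :: t).foldl pvStep (0, 0, 0) = (1+t.length, t.foldl min x, t.foldl max x) := by
  simp [List.foldl_cons, pvStep, foldStep_pos]

-- ===== VERDICT (by name: the statement is the Claim_ definition above) =====
theorem calculate_time_window_py_spec : Claim_equal_calculate_time_window_py := by
  intro events _
  unfold Spec_calculate_time_window_py calculate_time_window_py calculate_time_window_py_alt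
  rw [foldA_eq_filterMap, foldB_eq_foldStep]
  simp only [List.nil_append]
  cases hL : events.filterMap pvTs with
  | nil => simp
  | cons x t =>
    rw [foldStep_cons]
    cases t with
    | nil => simp
    | cons y r =>
      simp only [List.length_cons]
      rw [PySem.List.max?_id_cons, PySem.List.min?_id_cons]
      split_ifs <;> first | rfl | omega
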